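-- pv_equiv track=rewrite | github.com/AntonFerreiro/genomeAssembly | Scripts/COMPARAR.py | alineacion_circular
-- ===== SOURCE A (Python) =====
-- def alineacion_circular(original, ensamblado):
--     n = len(original)
--     max_coincidencia = 0
--     coincidencia = ""
--
--     original_circular = original + original
--
--     # Busca la coincidencia circular más larga, comparando subcadenas
--     for i in range(n):
--         subcadena = original_circular[i:i+n]
--         for j in range(1, n+1):
--             if subcadena[:j] == ensamblado[:j]:
--                 if j > max_coincidencia:
--                     max_coincidencia = j
--                     coincidencia = subcadena[:j]
--
--     return coincidencia, max_coincidencia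
-- ===== SOURCE B (Python) =====
-- def _lcp(xs, ys):
--     # length of the longest common prefix of two sequences
--     k = 0
--     for a, b in zip(xs, ys):
--         if a != b:
--             break
--         k += 1
--     return k
--
--
-- def alineacion_circular(original, ensamblado):
--     n = len(original)
--     doubled = original + original
--     best = 0
--     for i in range(n):
--         k = _lcp(doubled[i:i+n], ensamblado)
--         if k > best:
--             best = k
--     return ensamblado[:best], best
-- ===== Notes on version B (the rewrite author's own statement) =====
-- stated objective: faster
-- what changed: Instead of testing every prefix length j of every rotation with slice comparisons (three nested scans), B computes the longest-common-prefix length of each rotation with ensamblado in one character-by-character pass and takes the maximum, returning ensamblado's prefix of that length.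
import Mathlib
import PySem

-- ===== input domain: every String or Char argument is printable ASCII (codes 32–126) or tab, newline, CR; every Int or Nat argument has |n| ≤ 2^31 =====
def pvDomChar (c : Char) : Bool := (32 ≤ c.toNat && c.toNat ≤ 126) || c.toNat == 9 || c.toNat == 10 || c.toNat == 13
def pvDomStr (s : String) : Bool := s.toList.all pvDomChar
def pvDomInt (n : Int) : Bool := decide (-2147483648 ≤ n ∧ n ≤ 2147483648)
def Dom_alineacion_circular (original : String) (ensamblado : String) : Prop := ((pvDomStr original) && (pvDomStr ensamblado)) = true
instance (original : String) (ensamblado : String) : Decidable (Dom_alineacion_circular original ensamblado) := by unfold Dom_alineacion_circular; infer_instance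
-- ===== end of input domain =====

-- B replaces A's triple scan (every prefix length of every rotation, compared by slicing)
-- by one longest-common-prefix pass per rotation; objective: faster (O(n^2) vs O(n^3)).

-- ===== PORT A =====
-- inner 'for j in range(1, n+1)' body
def pvAstep (e sub : List Char) (st : Int × List Char) (j : Int) : Int × List Char :=
  if PySem.List.slice sub none (some j) = PySem.List.slice e none (some j) then
    if j > st.1 then (j, PySem.List.slice sub none (some j)) else st
  else st

-- inner loop over j
def pvAinner (e sub : List Char) (n : Int) (st : Int × List Char) : Int × List Char :=
  (PySem.List.pyRange 1 (n + 1) 1).foldl (pvAstep e sub) st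

-- outer loop over i, state = (max_coincidencia, coincidencia)
def pvAouter (e oc : List Char) (n : Int) : Int × List Char :=
  (PySem.List.pyRange 0 n 1).foldl
    (fun st i => pvAinner e (PySem.List.slice oc (some i) (some (i + n))) n st) (0, [])

def alineacion_circular (original : String) (ensamblado : String) : String × Int :=
  let ol := original.toList
  let el := ensamblado.toList
  let n : Int := ol.length
  let st := pvAouter el (ol ++ ol) n
  (String.ofList st.2, st.1)

-- ===== PORT B =====
-- _lcp: longest common prefix length, one pass over the zipped characters
def pvLcp : List Char → List Char → Nat
  | a :: as, b :: bs => if a = b then pvLcp as bs + 1 else 0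
  | _, _ => 0

-- B's loop over i, keeping only the best lcp length
def pvBbest (doubled e : List Char) (n : Nat) : Nat :=
  (List.range n).foldl
    (fun best i =>
      let k := pvLcp ((doubled.drop i).take n) e
      if k > best then k else best) 0

def alineacion_circular_alt (original : String) (ensamblado : String) : String × Int :=
  let ol := original.toList
  let el := ensamblado.toList
  let best := pvBbest (ol ++ ol) el ol.length
  (String.ofList (el.take best), (best : Int))

-- ===== PRECONDITION & SPEC =====
def Spec_alineacion_circular (original : String) (ensamblado : String) (out : String × Int) : Prop := out = alineacion_circular_alt original ensamblado
instance (original : String) (ensamblado : String) (out : String × Int) : Decidable (Spec_alineacion_circular original ensamblado out) := by unfold Spec_alineacion_circular; infer_instance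

-- ===== CLAIM (what is proved, stated in full; the proofs are below) =====
def Claim_equal_alineacion_circular : Prop := ∀ (original : String) (ensamblado : String), Dom_alineacion_circular original ensamblado → Spec_alineacion_circular original ensamblado (alineacion_circular original ensamblado)

-- ===== LEMMAS AND PROOFS =====

theorem pvLcp_le_left (xs ys : List Char) : pvLcp xs ys ≤ xs.length := by
  induction xs generalizing ys with
  | nil => cases ys <;> simp [pvLcp]
  | cons a as ih =>
    cases ys with
    | nil => simp [pvLcp]
    | cons b bs =>
      simp only [pvLcp]
      split_ifs
      · have := ih bs; simpa using Nat.succ_le_succ this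
      · simp

theorem take_pvLcp_eq (xs ys : List Char) :
    xs.take (pvLcp xs ys) = ys.take (pvLcp xs ys) := by
  induction xs generalizing ys with
  | nil => cases ys <;> simp [pvLcp]
  | cons a as ih =>
    cases ys with
    | nil => simp [pvLcp]
    | cons b bs =>
      simp only [pvLcp]
      split_ifs with h
      · subst h; simpa using ih bs
      · simp

theorem take_eq_iff_le_pvLcp (xs ys : List Char) (j : Nat) (hj : j ≤ xs.length) :
    xs.take j = ys.take j ↔ j ≤ pvLcp xs ys := by
  induction xs generalizing ys j with
  | nil =>
    have : j = 0 := by simpa using hj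
    subst this
    simp
  | cons a as ih =>
    cases j with
    | zero => simp
    | succ j' =>
      cases ys with
      | nil =>
        constructor
        · intro h; simp at h
        · intro h; simp [pvLcp] at h
      | cons b bs =>
        simp only [pvLcp, List.take_succ_cons]
        constructor
        · intro h
          have hab : a = b := by
            have := congrArg (fun l => l.head?) h; simpa using this
          have htl : as.take j' = bs.take j' := by
            have := congrArg (fun l => l.tail) h; simpa using this
          rw [if_pos hab]
          have := (ih bs j' (by simpa using Nat.le_of_succ_le_succ hj)).1 htl
          omega
        · intro h
          split_ifs at h with hab
          · subst hab
            have := (ih bs j' (by simpa using Nat.le_of_succ_le_succ hj)).2 (by omega)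
            simp [this]
          · omega

-- inner loop characterisation: folding j = 1..t pushes the state to the capped lcp
theorem pvAinner_char (e sub : List Char) (t : Nat) (ht : t ≤ sub.length) (m : Nat) (c : List Char) :
    (PySem.List.pyRange 1 ((t : Int) + 1) 1).foldl (pvAstep e sub) ((m : Int), c) =
      (if min (pvLcp sub e) t > m
        then ((((min (pvLcp sub e) t) : Nat) : Int), sub.take (min (pvLcp sub e) t))
        else ((m : Int), c)) := by
  induction t with
  | zero =>
    have h0 : ((0 : Nat) : Int) + 1 = 1 := by norm_num
    rw [h0, PySem.List.pyRange_one_eq_nil le_rfl]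
    simp
  | succ t ihk =>
    have hcast : ((t + 1 : Nat) : Int) + 1 = ((t : Int) + 1) + 1 := by push_cast; ring
    have hsplit : PySem.List.pyRange 1 (((t : Int) + 1) + 1) 1 =
        PySem.List.pyRange 1 ((t : Int) + 1) 1 ++ [(t : Int) + 1] := by
      exact PySem.List.pyRange_one_succ_right (by omega)
    rw [hcast, hsplit, List.foldl_append, ihk (by omega)]
    set L := pvLcp sub e with hL
    have hto : PySem.List.slice sub none (some ((t : Int) + 1)) = sub.take (t + 1) := by
      have := PySem.List.slice_to_natCast sub (t + 1)
      rw [← this]; norm_num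
    have hto' : PySem.List.slice e none (some ((t : Int) + 1)) = e.take (t + 1) := by
      have := PySem.List.slice_to_natCast e (t + 1)
      rw [← this]; norm_num
    have hiff := take_eq_iff_le_pvLcp sub e (t + 1) ht
    by_cases hle : t + 1 ≤ L
    · have heq : sub.take (t + 1) = e.take (t + 1) := hiff.2 hle
      have hmt : min L t = t := by omega
      have hmin1 : min L (t + 1) = t + 1 := by omega
      rcases Nat.lt_or_ge m (t + 1) with hm1 | hm1
      · rcases Nat.lt_or_ge m (min L t) with h1 | h1
        · rw [if_pos h1]
          simp only [List.foldl_cons, List.foldl_nil, pvAstep]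
          rw [hto, hto', if_pos heq]
          rw [if_pos (show ((t : Int) + 1) > ((min L t : Nat) : Int) by push_cast; omega)]
          rw [if_pos (show min L (t + 1) > m by omega), hmin1]
          push_cast; ring_nf
        · rw [if_neg (by omega)]
          simp only [List.foldl_cons, List.foldl_nil, pvAstep]
          rw [hto, hto', if_pos heq]
          rw [if_pos (show ((t : Int) + 1) > ((m : Nat) : Int) by push_cast; omega)]
          rw [if_pos (show min L (t + 1) > m by omega), hmin1]
          push_cast; ring_nf
      · rw [if_neg (by omega)]
        simp only [List.foldl_cons, List.foldl_nil, pvAstep]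
        rw [hto, hto', if_pos heq]
        rw [if_neg (show ¬ (((t : Int) + 1) > ((m : Nat) : Int)) by push_cast; omega)]
        rw [if_neg (show ¬ (min L (t + 1) > m) by omega)]
    · have hne : sub.take (t + 1) ≠ e.take (t + 1) := fun h => hle (hiff.1 h)
      have hmin : min L (t + 1) = min L t := by omega
      rw [hmin]
      have hstep : ∀ X : Int × List Char,
          List.foldl (pvAstep e sub) X [(t : Int) + 1] = X := by
        intro X
        simp only [List.foldl_cons, List.foldl_nil, pvAstep]
        rw [hto, hto', if_neg hne]
      rw [hstep]

-- outer loop: A's state after i = 0..m equals (best, e.take best) for B's best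
theorem pvAouter_partial (e oc : List Char) (n : Nat) (hoc : oc.length = 2 * n)
    (m : Nat) (hm : m ≤ n) (b : Nat) :
    (PySem.List.pyRange 0 (m : Int) 1).foldl
        (fun st i => pvAinner e (PySem.List.slice oc (some i) (some (i + (n : Int)))) (n : Int) st)
        ((b : Int), e.take b) =
      (let best := (List.range m).foldl
          (fun best i =>
            let k := pvLcp ((oc.drop i).take n) e
            if k > best then k else best) b
       ((best : Int), e.take best)) := by
  induction m generalizing b with
  | zero =>
    rw [show ((0 : Nat) : Int) = 0 by norm_num, PySem.List.pyRange_one_eq_nil le_rfl]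
    simp
  | succ m ih =>
    have hcast : ((m + 1 : Nat) : Int) = (m : Int) + 1 := by push_cast; ring
    have hsplit : PySem.List.pyRange 0 ((m : Int) + 1) 1 =
        PySem.List.pyRange 0 (m : Int) 1 ++ [(m : Int)] := by
      exact PySem.List.pyRange_one_succ_right (by omega)
    rw [hcast, hsplit, List.range_succ, List.foldl_append, List.foldl_append,
      ih (by omega) b]
    simp only [List.foldl_cons, List.foldl_nil]
    set B := (List.range m).foldl
        (fun best i =>
          let k := pvLcp ((oc.drop i).take n) e
          if k > best then k else best) b with hB
    set sub := (oc.drop m).take n with hsub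
    have hslice : PySem.List.slice oc (some (m : Int)) (some ((m : Int) + (n : Int))) = sub := by
      rw [hsub]; exact PySem.List.slice_natCast_add oc m n
    have hsl : sub.length = n := by
      rw [hsub, List.length_take, List.length_drop, hoc]; omega
    have hL : pvLcp sub e ≤ n := le_trans (pvLcp_le_left sub e) (le_of_eq hsl)
    have hchar := pvAinner_char e sub n (le_of_eq hsl.symm) B (e.take B)
    have hmin : min (pvLcp sub e) n = pvLcp sub e := by omega
    rw [hmin] at hchar
    simp only [pvAinner, hslice]
    rw [hchar]
    have htake : sub.take (pvLcp sub e) = e.take (pvLcp sub e) := take_pvLcp_eq sub e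
    by_cases h1 : pvLcp sub e > B
    · rw [if_pos h1]
      simp only [htake]
      simp [h1]
    · rw [if_neg h1]
      simp [h1]

-- ===== VERDICT (by name: the statement is the Claim_ definition above) =====
theorem alineacion_circular_spec : Claim_equal_alineacion_circular := by
  intro original ensamblado _
  unfold Spec_alineacion_circular alineacion_circular alineacion_circular_alt
  set ol := original.toList
  set el := ensamblado.toList
  have hlen : (ol ++ ol).length = 2 * ol.length := by
    rw [List.length_append]; omega
  have h := pvAouter_partial el (ol ++ ol) ol.length hlen ol.length (le_refl _) 0
  have h0 : (((0 : Nat) : Int), el.take 0) = ((0 : Int), ([] : List Char)) := by simp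
  rw [h0] at h
  simp only [pvAouter, pvBbest]
  rw [h]
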